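-- pv_equiv track=rewrite | github.com/pypi-data/pypi-code-44 | classcard-dataclient/classcard_dataclient-1.0.24-py3-none-any.whl/sdtu/sync/course.py | analyse_position
-- ===== SOURCE A (Python) =====
-- def analyse_position(jc, week):
--     course_week = int(week)
--     position = []
--     jc_items = jc.split('-')
--     if len(jc_items) == 1:
--         position.append((int(jc_items[0]), course_week))
--     elif len(jc_items) == 2:
--         for item in range(int(jc_items[0]), int(jc_items[1]) + 1):
--             position.append((item, course_week))
--     return position
-- ===== SOURCE B (Python) =====
-- def analyse_position(jc, week):
--     course_week = int(week)
--     parts = jc.split('-')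
--     if len(parts) > 2:
--         return []
--     lo = int(parts[0])
--     hi = int(parts[-1])
--     # build the result back-to-front: walk hi, hi-1, ..., lo and prepend
--     out = []
--     p = hi
--     while p >= lo:
--         out = [(p, course_week)] + out
--         p -= 1
--     return out
-- ===== Notes on version B (the rewrite author's own statement) =====
-- stated objective: alternative
-- what changed: B computes the endpoints uniformly (parts[0], parts[-1]) and builds the result back-to-front with a descending while loop that prepends, instead of A's one-vs-two branch split with a forward range loop that appends.
import Mathlib
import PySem

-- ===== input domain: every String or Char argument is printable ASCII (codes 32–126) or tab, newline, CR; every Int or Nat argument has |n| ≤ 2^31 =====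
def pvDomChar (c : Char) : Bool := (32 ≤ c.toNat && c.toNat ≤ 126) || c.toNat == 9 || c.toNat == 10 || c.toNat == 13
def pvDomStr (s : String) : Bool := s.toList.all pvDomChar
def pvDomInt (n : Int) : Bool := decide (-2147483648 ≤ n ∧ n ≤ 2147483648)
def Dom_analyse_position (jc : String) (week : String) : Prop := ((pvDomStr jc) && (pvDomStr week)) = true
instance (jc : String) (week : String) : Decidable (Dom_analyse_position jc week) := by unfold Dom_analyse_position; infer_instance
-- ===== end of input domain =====

-- B computes the endpoints uniformly (parts[0], parts[-1]) and builds the result back-to-front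
-- with a descending while loop that prepends, instead of A's branch split + forward range-append
-- loop (objective: alternative).

-- ===== PORT A =====
def analyse_position (jc : String) (week : String) : List (Int × Int) :=
  let course_week : Int := (PySem.Int.ofStr? week).getD 0
  let jc_items := (PySem.Str.split? jc "-").getD []
  if jc_items.length = 1 then
    [((PySem.Int.ofStr? (jc_items.getD 0 "")).getD 0, course_week)]
  else if jc_items.length = 2 then
    (PySem.List.pyRange ((PySem.Int.ofStr? (jc_items.getD 0 "")).getD 0)
        (((PySem.Int.ofStr? (jc_items.getD 1 "")).getD 0) + 1) 1).foldl
      (fun position item => position ++ [(item, course_week)]) []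
  else []

-- ===== PORT B =====
-- the while loop 'while p >= lo: out = [(p, cw)] + out; p -= 1' as descending recursion
def buildDown (lo cw : Int) (p : Int) (out : List (Int × Int)) : List (Int × Int) :=
  if lo ≤ p then buildDown lo cw (p - 1) ((p, cw) :: out) else out
termination_by (p - lo + 1).toNat
decreasing_by omega

def analyse_position_alt (jc : String) (week : String) : List (Int × Int) :=
  let course_week : Int := (PySem.Int.ofStr? week).getD 0
  let parts := (PySem.Str.split? jc "-").getD []
  if 2 < parts.length then []
  else
    let lo := (PySem.Int.ofStr? (parts.getD 0 "")).getD 0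
    let hi := (PySem.Int.ofStr? ((PySem.List.pyGet? parts (-1)).getD "")).getD 0
    buildDown lo course_week hi []

-- ===== PRECONDITION & SPEC =====
-- Pre_ excludes exactly the inputs where Python raises ValueError: int(week) must parse, and
-- when jc splits into one or two parts those parts must parse as ints.
def Pre_analyse_position (jc : String) (week : String) : Prop :=
  let parts := (PySem.Str.split? jc "-").getD []
  (PySem.Int.ofStr? week).isSome = true ∧
  (parts.length = 1 → (PySem.Int.ofStr? (parts.getD 0 "")).isSome = true) ∧
  (parts.length = 2 → (PySem.Int.ofStr? (parts.getD 0 "")).isSome = true ∧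
                      (PySem.Int.ofStr? (parts.getD 1 "")).isSome = true)
instance (jc : String) (week : String) : Decidable (Pre_analyse_position jc week) := by
  unfold Pre_analyse_position; infer_instance
def pvWitness_analyse_position : String × String := ("1-3", "2")

def Spec_analyse_position (jc : String) (week : String) (out : List (Int × Int)) : Prop := out = analyse_position_alt jc week
instance (jc : String) (week : String) (out : List (Int × Int)) : Decidable (Spec_analyse_position jc week out) := by unfold Spec_analyse_position; infer_instance

-- ===== CLAIM =====
def Claim_equal_analyse_position : Prop := ∀ (jc : String) (week : String), Dom_analyse_position jc week → Pre_analyse_position jc week → Spec_analyse_position jc week (analyse_position jc week)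

-- ===== LEMMAS AND PROOFS =====

theorem splitOn_go_ne_nil (sep : List Char) (fuel : Nat) (l cur : List Char) (acc : List (List Char)) :
    PySem.Chars.splitOn.go sep fuel l cur acc ≠ [] := by
  induction fuel generalizing l cur acc with
  | zero => simp [PySem.Chars.splitOn.go]
  | succ n ih =>
    cases l with
    | nil => simp [PySem.Chars.splitOn.go]
    | cons c rest =>
      rw [PySem.Chars.splitOn.go]
      split_ifs <;> apply ih

theorem split_getD_ne_nil (jc : String) : (PySem.Str.split? jc "-").getD [] ≠ [] := by
  simp [PySem.Str.split?, PySem.Chars.split?, PySem.Chars.splitOn]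
  exact splitOn_go_ne_nil _ _ _ _ _

theorem buildDown_eq (lo cw : Int) (p : Int) (out : List (Int × Int)) :
    buildDown lo cw p out = (PySem.List.pyRange lo (p + 1) 1).map (fun x => (x, cw)) ++ out := by
  by_cases h : lo ≤ p
  · rw [buildDown, if_pos h, buildDown_eq lo cw (p - 1),
      PySem.List.pyRange_one_succ_right h]
    simp
  · rw [buildDown, if_neg h, PySem.List.pyRange_one_eq_nil (by omega)]
    simp
termination_by (p - lo + 1).toNat
decreasing_by omega

-- ===== VERDICT =====
theorem analyse_position_spec : Claim_equal_analyse_position := by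
  intro jc week _ _
  unfold Spec_analyse_position analyse_position analyse_position_alt
  cases h : (PySem.Str.split? jc "-").getD [] with
  | nil => exact absurd h (split_getD_ne_nil jc)
  | cons a t =>
    cases t with
    | nil =>
      simp [buildDown_eq, PySem.List.pyGet?_neg_one, PySem.List.pyRange_one_singleton]
    | cons b t' =>
      cases t' with
      | nil =>
        simp only [List.length_cons, List.length_nil]
        rw [PySem.List.foldl_append_singleton_eq_map, buildDown_eq]
        simp [PySem.List.pyGet?_neg_one]
      | cons c t'' =>
        simp [List.length]
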